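-- pv_equiv track=rewrite | github.com/bitplane/mapillary_downloader | src/mapillary_downloader/locations.py | _is_clean_ascii
-- ===== SOURCE A (Python) =====
-- def _is_clean_ascii(s):
--     """Pure ASCII letters with optional space, hyphen, apostrophe, or period, capitalised."""
--     if not s or not s[0].isupper():
--         return False
--     if not s.isascii():
--         return False
--     stripped = s
--     for ch in " -'.":
--         stripped = stripped.replace(ch, "")
--     return bool(stripped) and stripped.isalpha()
-- ===== SOURCE B (Python) =====
-- def _is_clean_ascii(s):
--     """Pure ASCII letters with optional space, hyphen, apostrophe, or period, capitalised."""
--     if not s or not s[0].isupper():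
--         return False
--     for ch in s:
--         if ord(ch) > 127:
--             return False
--         if ch in " -'.":
--             continue
--         if not ch.isalpha():
--             return False
--     return True
-- ===== Notes on version B (the rewrite author's own statement) =====
-- stated objective: alternative
-- what changed: Replaced the isascii check plus four whole-string .replace passes plus the emptiness/isalpha test with a single early-exit scan over the characters (per char: ASCII check, skip-set check, letter check); the guard makes the nonemptiness test unnecessary.
import Mathlib
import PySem

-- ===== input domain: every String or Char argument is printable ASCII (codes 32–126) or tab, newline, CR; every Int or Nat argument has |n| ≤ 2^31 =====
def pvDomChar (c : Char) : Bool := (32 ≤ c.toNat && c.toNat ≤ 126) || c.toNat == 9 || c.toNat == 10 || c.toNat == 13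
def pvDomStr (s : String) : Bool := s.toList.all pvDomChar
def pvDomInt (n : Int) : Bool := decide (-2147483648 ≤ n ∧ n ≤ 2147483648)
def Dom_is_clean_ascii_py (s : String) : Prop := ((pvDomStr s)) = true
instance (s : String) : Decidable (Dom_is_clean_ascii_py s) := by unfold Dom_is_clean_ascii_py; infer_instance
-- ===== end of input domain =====

-- B replaces A's four .replace passes plus isascii/isalpha whole-string tests by one early-exit
-- scan over the characters (alternative decomposition, same O(n) cost).

-- ===== PORT A =====
def is_clean_ascii_py (s : String) : Bool :=
  match s.toList with
  | [] => false                                      -- not s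
  | c :: _ =>
    if !(PySem.Chars.isupper c) then false           -- not s[0].isupper()
    -- s.isascii(): every code point < 128 (exact on the stated ASCII domain and beyond)
    else if !(s.toList.all (fun ch => decide (ch.toNat < 128))) then false
    else
      -- for ch in " -'.": stripped = stripped.replace(ch, "")
      let stripped := (" -'.".toList).foldl (fun acc ch => PySem.Chars.replace acc [ch] []) s.toList
      !stripped.isEmpty && PySem.Chars.strIsalpha stripped

-- ===== PORT B =====
-- the for-loop of Source B over the characters of s
def pvScanClean : List Char → Bool
  | [] => true
  | ch :: rest =>
    if 127 < ch.toNat then false                     -- ord(ch) > 127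
    else if (" -'.".toList).contains ch then pvScanClean rest
    else if !(PySem.Chars.isalpha ch) then false
    else pvScanClean rest

def is_clean_ascii_py_alt (s : String) : Bool :=
  match s.toList with
  | [] => false
  | c :: _ =>
    if !(PySem.Chars.isupper c) then false
    else pvScanClean s.toList

-- ===== PRECONDITION & SPEC =====
def Spec_is_clean_ascii_py (s : String) (out : Bool) : Prop := out = is_clean_ascii_py_alt s
instance (s : String) (out : Bool) : Decidable (Spec_is_clean_ascii_py s out) := by unfold Spec_is_clean_ascii_py; infer_instance

-- ===== CLAIM (what is proved, stated in full; the proofs are below) =====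
def Claim_equal_is_clean_ascii_py : Prop := ∀ (s : String), Dom_is_clean_ascii_py s → Spec_is_clean_ascii_py s (is_clean_ascii_py s)

-- ===== LEMMAS AND PROOFS =====

-- str.replace with a one-character pattern and empty replacement is a filter
theorem pv_go_single (c : Char) : ∀ (fuel : Nat) (l acc : List Char), l.length ≤ fuel →
    PySem.Chars.replace.go [c] [] fuel l acc = acc.reverse ++ l.filter (fun x => x != c) := by
  intro fuel
  induction fuel with
  | zero =>
    intro l acc h
    have : l = [] := List.eq_nil_of_length_eq_zero (Nat.le_zero.mp h)
    subst this
    simp [PySem.Chars.replace.go]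
  | succ n ih =>
    intro l acc h
    cases l with
    | nil => simp [PySem.Chars.replace.go]
    | cons hd tl =>
      by_cases hc : c = hd
      · subst hc
        have hpre : [c].isPrefixOf (c :: tl) = true := by simp [List.isPrefixOf]
        simp only [PySem.Chars.replace.go, hpre, if_true, List.length_cons, List.length_nil,
          List.drop_succ_cons, List.drop_zero, List.reverse_nil, List.nil_append]
        rw [ih tl acc (by simpa using Nat.le_of_succ_le_succ h)]
        simp
      · have hpre : [c].isPrefixOf (hd :: tl) = false := by
          simp [List.isPrefixOf]; exact hc
        simp only [PySem.Chars.replace.go, hpre, Bool.false_eq_true, if_false]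
        rw [ih tl (hd :: acc) (by simpa using Nat.le_of_succ_le_succ h)]
        simp [Ne.symm hc]

theorem pv_replace_single (c : Char) (l : List Char) :
    PySem.Chars.replace l [c] [] = l.filter (fun x => x != c) := by
  unfold PySem.Chars.replace
  simp [pv_go_single c l.length l [] le_rfl]

theorem pv_stripped_eq (l : List Char) :
    (" -'.".toList).foldl (fun acc ch => PySem.Chars.replace acc [ch] []) l
      = l.filter (fun x => !((" -'.".toList).contains x)) := by
  have h : " -'.".toList = [' ', '-', '\'', '.'] := rfl
  rw [h]
  simp only [List.foldl_cons, List.foldl_nil, pv_replace_single, List.filter_filter]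
  apply List.filter_congr
  intro x _
  by_cases h1 : x = ' ' <;> by_cases h2 : x = '-' <;> by_cases h3 : x = '\'' <;>
    by_cases h4 : x = '.' <;> simp [h1, h2, h3, h4]

-- the scan computes an 'all' over the characters
theorem pv_scan_eq (l : List Char) :
    pvScanClean l = l.all (fun ch => !(decide (127 < ch.toNat)) &&
      ((" -'.".toList).contains ch || PySem.Chars.isalpha ch)) := by
  induction l with
  | nil => rfl
  | cons hd tl ih =>
    simp only [pvScanClean, List.all_cons]
    by_cases h1 : 127 < hd.toNat
    · simp [h1]
    · by_cases hp : hd = ' ' ∨ hd = '-' ∨ hd = '\'' ∨ hd = '.'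
      · rcases hp with rfl | rfl | rfl | rfl <;> simp [ih]
      · push_neg at hp
        obtain ⟨n1, n2, n3, n4⟩ := hp
        by_cases h3 : PySem.Chars.isalpha hd
        · simp [h1, n1, n2, n3, n4, h3, ih]
        · simp [h1, n1, n2, n3, n4, h3]

theorem pv_upper_not_skip (c : Char) (h : PySem.Chars.isupper c = true) :
    (" -'.".toList).contains c = false := by
  cases hb : (" -'.".toList).contains c with
  | false => rfl
  | true =>
    exfalso
    have hm : c ∈ " -'.".toList := by simpa using hb
    have : c = ' ' ∨ c = '-' ∨ c = '\'' ∨ c = '.' := by simpa using hm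
    rcases this with rfl | rfl | rfl | rfl <;> exact absurd h (by decide)

theorem pv_core (c : Char) (t : List Char)
    (hkc : (" -'.".toList).contains c = false)
    (halc : PySem.Chars.isalpha c = true) :
    (if !((c :: t).all (fun ch => decide (ch.toNat < 128))) then false
     else
       (!((c :: t).filter (fun x => !((" -'.".toList).contains x))).isEmpty &&
        PySem.Chars.strIsalpha ((c :: t).filter (fun x => !((" -'.".toList).contains x)))))
    = (c :: t).all (fun ch => !(decide (127 < ch.toNat)) &&
        ((" -'.".toList).contains ch || PySem.Chars.isalpha ch)) := by
  by_cases hascii : ((c :: t).all (fun ch => decide (ch.toNat < 128))) = true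
  · rw [hascii]
    have hcf : c ∈ (c :: t).filter (fun x => !((" -'.".toList).contains x)) := by
      rw [List.mem_filter]
      exact ⟨List.mem_cons_self, by rw [hkc]; rfl⟩
    have hfne : ((c :: t).filter (fun x => !((" -'.".toList).contains x))).isEmpty = false := by
      cases hf : (c :: t).filter (fun x => !((" -'.".toList).contains x)) with
      | nil => rw [hf] at hcf; simp at hcf
      | cons a b => rfl
    simp only [Bool.not_true, Bool.false_eq_true, if_false, PySem.Chars.strIsalpha, hfne,
      Bool.not_false, Bool.true_and]
    rw [Bool.eq_iff_iff]
    simp only [List.all_eq_true, List.mem_filter, Bool.and_eq_true, Bool.or_eq_true,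
      Bool.not_eq_true', decide_eq_false_iff_not, Nat.not_lt, decide_eq_true_eq]
    constructor
    · intro h x hx
      have hx128 : x.toNat < 128 := by simpa using (List.all_eq_true.mp hascii x hx)
      refine ⟨by omega, ?_⟩
      by_cases hs : (" -'.".toList).contains x = true
      · exact Or.inl hs
      · exact Or.inr (h x ⟨hx, eq_false_of_ne_true hs⟩)
    · intro h x hx
      rcases hx with ⟨hxm, hxk⟩
      rcases (h x hxm).2 with hsk | hal
      · rw [hxk] at hsk; exact absurd hsk (by simp)
      · exact hal
  · rw [eq_false_of_ne_true hascii]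
    simp only [Bool.not_false, if_true]
    symm
    rw [List.all_eq_false]
    rcases List.all_eq_false.mp (eq_false_of_ne_true hascii) with ⟨x, hxm, hxp⟩
    refine ⟨x, hxm, ?_⟩
    simp only [decide_eq_true_eq] at hxp
    simp only [Bool.and_eq_true, Bool.not_eq_true', decide_eq_false_iff_not, Nat.not_lt]
    intro hcon
    exact hxp (by omega)

-- ===== VERDICT (by name: the statement is the Claim_ definition above) =====
theorem is_clean_ascii_py_spec : Claim_equal_is_clean_ascii_py := by
  intro s _
  unfold Spec_is_clean_ascii_py is_clean_ascii_py is_clean_ascii_py_alt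
  rcases hl : s.toList with _ | ⟨c, t⟩
  · rfl
  · by_cases hup : PySem.Chars.isupper c = true
    · have halc : PySem.Chars.isalpha c = true := by
        simp [PySem.Chars.isalpha, hup]
      have hkc := pv_upper_not_skip c hup
      simp only [hup, Bool.not_true, Bool.false_eq_true, if_false]
      rw [pv_stripped_eq, pv_scan_eq]
      exact pv_core c t hkc halc
    · simp only [eq_false_of_ne_true hup, Bool.not_false, if_true]
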